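-- pv_equiv track=rewrite | github.com/romanofski/codesnippets | codejam2009a/codejam2009a.py | compile_re
-- ===== SOURCE A (Python) =====
-- def compile_re(pattern):
--     if not '(' in pattern:
--         return pattern
--     result = []
--     in_parenthesis = False
--     length = len(pattern)
--     i = 0
--     for l in list(pattern):
--         if l == '(':
--             in_parenthesis = True
--         elif in_parenthesis and l == ')':
--             in_parenthesis = False
--         elif in_parenthesis and not length == i+1 and not pattern[i+1] == ')':
--             l += '|'
--         result.append(l)
--         i += 1
--     return ''.join(result)
-- ===== SOURCE B (Python) =====
-- def compile_re(pattern):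
--     out = []
--     i = 0
--     n = len(pattern)
--     while i < n:
--         c = pattern[i]
--         i += 1
--         out.append(c)
--         if c == '(':
--             j = pattern.find(')', i)
--             content = pattern[i:] if j < 0 else pattern[i:j]
--             i = n if j < 0 else j
--             out.append(_rebuild(content))
--     return ''.join(out)
--
-- def _rebuild(content):
--     parts = []
--     prev = None
--     for ch in content:
--         if prev is not None and prev != '(':
--             parts.append('|')
--         parts.append(ch)
--         prev = ch
--     return ''.join(parts)
-- ===== Notes on version B (the rewrite author's own statement) =====
-- stated objective: alternative
-- what changed: Replaces A's single per-character scan with an in_parenthesis flag and one-character lookahead by region extraction: the outer loop copies text and, at each opening parenthesis, slices the group content up to the next closing parenthesis and joins it with alternation bars inserted between adjacent characters unless the left one is itself an opening parenthesis.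
import Mathlib
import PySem

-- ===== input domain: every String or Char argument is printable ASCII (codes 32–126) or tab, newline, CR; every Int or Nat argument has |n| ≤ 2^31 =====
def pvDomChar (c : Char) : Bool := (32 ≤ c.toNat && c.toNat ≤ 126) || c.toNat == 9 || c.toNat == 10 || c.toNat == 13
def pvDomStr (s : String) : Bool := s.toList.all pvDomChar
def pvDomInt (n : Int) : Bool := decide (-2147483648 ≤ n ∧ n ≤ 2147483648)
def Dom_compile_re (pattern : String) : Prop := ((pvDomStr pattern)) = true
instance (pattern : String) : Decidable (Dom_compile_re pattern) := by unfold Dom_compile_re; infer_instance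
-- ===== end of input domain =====

-- B replaces A's per-character in_parenthesis flag scan by region extraction (split at each
-- '(' , take the content up to the next ')') plus a per-group join that inserts '|' between
-- adjacent content characters unless the left one is '('.  Objective: alternative decomposition.

-- ===== PORT A =====
-- the for-loop over list(pattern) with counter i, flag in_parenthesis and accumulator result;
-- pattern[i+1] is ported with PySem.List.pyGet? (the guards `not length == i+1` make it in range,
-- so .getD ' ' never supplies its default)
def compileReGoA (full : List Char) (i : Nat) (inP : Bool) (cs : List Char) : List Char :=
  match cs with
  | [] => []
  | l :: rest =>
    if l = '(' then l :: compileReGoA full (i+1) true rest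
    else if inP ∧ l = ')' then l :: compileReGoA full (i+1) false rest
    else if inP ∧ ¬ full.length = i+1 ∧ ¬ (PySem.List.pyGet? full ((i : Int)+1)).getD ' ' = ')' then
      l :: '|' :: compileReGoA full (i+1) inP rest
    else l :: compileReGoA full (i+1) inP rest

def compile_re (pattern : String) : String :=
  if ¬ pattern.toList.contains '(' then pattern
  else String.ofList (compileReGoA pattern.toList 0 false pattern.toList)

-- ===== PORT B =====
-- _rebuild of Source B: prev is None before the first character
def compileReRebuild (prev : Option Char) (content : List Char) : List Char :=
  match content with
  | [] => []
  | ch :: r =>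
    (if prev ≠ none ∧ prev ≠ some '(' then ['|'] else []) ++ ch :: compileReRebuild (some ch) r

-- the while loop of Source B over the remaining suffix; rest.find(')') with the two slices is
-- exactly takeWhile/dropWhile at the first ')'
def compileReGoB (cs : List Char) : List Char :=
  match cs with
  | [] => []
  | c :: rest =>
    if c = '(' then
      c :: (compileReRebuild none (rest.takeWhile (· ≠ ')')) ++
            compileReGoB (rest.dropWhile (· ≠ ')')))
    else c :: compileReGoB rest
termination_by cs.length
decreasing_by
  · simpa using Nat.lt_succ_of_le (List.length_dropWhile_le _ _)
  · simp

def compile_re_alt (pattern : String) : String :=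
  String.ofList (compileReGoB pattern.toList)

-- ===== PRECONDITION & SPEC =====
def Spec_compile_re (pattern : String) (out : String) : Prop := out = compile_re_alt pattern
instance (pattern : String) (out : String) : Decidable (Spec_compile_re pattern out) := by unfold Spec_compile_re; infer_instance

-- ===== CLAIM (what is proved, stated in full; the proofs are below) =====
def Claim_equal_compile_re : Prop := ∀ (pattern : String), Dom_compile_re pattern → Spec_compile_re pattern (compile_re pattern)

-- ===== LEMMAS AND PROOFS =====

-- index-free restatement of A's loop body (pattern[i+1] becomes rest.head?)
def compileReSpecA (inP : Bool) (cs : List Char) : List Char :=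
  match cs with
  | [] => []
  | l :: rest =>
    if l = '(' then l :: compileReSpecA true rest
    else if inP ∧ l = ')' then l :: compileReSpecA false rest
    else if inP ∧ ∃ c, rest.head? = some c ∧ c ≠ ')' then
      l :: '|' :: compileReSpecA inP rest
    else l :: compileReSpecA inP rest

lemma drop_succ_of_drop_cons (full : List Char) (i : Nat) (l : Char) (rest : List Char)
    (h : full.drop i = l :: rest) : full.drop (i+1) = rest := by
  rw [← List.tail_drop, h]
  rfl

lemma goA_eq_specA (full : List Char) (cs : List Char) :
    ∀ (inP : Bool) (i : Nat), full.drop i = cs →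
      compileReGoA full i inP cs = compileReSpecA inP cs := by
  induction cs with
  | nil => intro inP i h; simp [compileReGoA, compileReSpecA]
  | cons l rest ih =>
    intro inP i h
    have hrest : full.drop (i+1) = rest := drop_succ_of_drop_cons full i l rest h
    have hlen : i + 1 + rest.length = full.length := by
      have h1 := congrArg List.length h
      simp [List.length_drop] at h1
      omega
    have hget : PySem.List.pyGet? full ((i : Int) + 1) = rest.head? := by
      have e : ((i : Int) + 1) = ((i + 1 : Nat) : Int) := by push_cast; ring
      rw [e, PySem.List.pyGet?_natCast, ← hrest, List.head?_eq_getElem?, List.getElem?_drop]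
    have hiff : ((inP = true ∧ ¬ full.length = i+1 ∧
          ¬ (PySem.List.pyGet? full ((i : Int)+1)).getD ' ' = ')')
        ↔ (inP = true ∧ ∃ c, rest.head? = some c ∧ c ≠ ')')) := by
      rw [hget]
      cases rest with
      | nil =>
        simp at hlen
        simp [hlen]
      | cons c' r' =>
        have h1 : ¬ full.length = i+1 := by simp at hlen; omega
        simp [h1]
    unfold compileReGoA compileReSpecA
    by_cases hp : l = '('
    · rw [if_pos hp, if_pos hp, ih true (i+1) hrest]
    · rw [if_neg hp, if_neg hp]
      by_cases h2 : inP = true ∧ l = ')'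
      · rw [if_pos h2, if_pos h2, ih false (i+1) hrest]
      · rw [if_neg h2, if_neg h2]
        by_cases h3 : inP = true ∧ ∃ c, rest.head? = some c ∧ c ≠ ')'
        · rw [if_pos (hiff.mpr h3), if_pos h3, ih inP (i+1) hrest]
        · rw [if_neg (fun hh => h3 (hiff.mp hh)), if_neg h3, ih inP (i+1) hrest]

lemma rebuild_paren (t : List Char) :
    compileReRebuild (some '(') t = compileReRebuild none t := by
  cases t <;> simp [compileReRebuild]

-- joint induction: A's flag-false state matches B's outer loop, and A's flag-true state matches
-- B's per-group rebuild followed by the outer loop on the remainder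
lemma specA_eq_goB : ∀ (n : Nat) (cs : List Char), cs.length ≤ n →
    (compileReSpecA false cs = compileReGoB cs ∧
     compileReSpecA true cs = compileReRebuild none (cs.takeWhile (· ≠ ')')) ++
       compileReGoB (cs.dropWhile (· ≠ ')'))) := by
  intro n
  induction n with
  | zero =>
    intro cs h
    have : cs = [] := by cases cs <;> simp_all
    subst this
    simp [compileReSpecA, compileReGoB, compileReRebuild]
  | succ n ih =>
    intro cs h
    cases cs with
    | nil => simp [compileReSpecA, compileReGoB, compileReRebuild]
    | cons c rest =>
      have hr : rest.length ≤ n := by simp at h; omega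
      constructor
      · -- flag false
        by_cases hp : c = '('
        · subst hp
          unfold compileReSpecA compileReGoB
          rw [if_pos rfl, if_pos rfl, (ih rest hr).2]
        · unfold compileReSpecA compileReGoB
          rw [if_neg hp, if_neg hp]
          have h1 : ¬ (false = true ∧ c = ')') := by simp
          rw [if_neg h1]
          have h2 : ¬ (false = true ∧ ∃ c', rest.head? = some c' ∧ c' ≠ ')') := by simp
          rw [if_neg h2, (ih rest hr).1]
      · -- flag true
        by_cases hp : c = '('
        · subst hp
          unfold compileReSpecA
          rw [if_pos rfl, (ih rest hr).2]
          have ht : (('(' : Char) :: rest).takeWhile (· ≠ ')') =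
              '(' :: rest.takeWhile (· ≠ ')') := by simp
          have hd : (('(' : Char) :: rest).dropWhile (· ≠ ')') =
              rest.dropWhile (· ≠ ')') := by simp
          rw [ht, hd]
          simp [compileReRebuild, rebuild_paren]
        · by_cases hq : c = ')'
          · subst hq
            unfold compileReSpecA
            rw [if_neg hp, if_pos (show (true = true ∧ (')' : Char) = ')') from ⟨rfl, rfl⟩)]
            have ht : ((')' : Char) :: rest).takeWhile (· ≠ ')') = [] := by
              simp
            have hd : ((')' : Char) :: rest).dropWhile (· ≠ ')') = ')' :: rest := by
              simp
            rw [ht, hd]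
            unfold compileReGoB
            rw [if_neg hp]
            simp [compileReRebuild, (ih rest hr).1]
          · -- ordinary character inside the group
            unfold compileReSpecA
            rw [if_neg hp]
            have hnc : ¬ (true = true ∧ c = ')') := by simp [hq]
            rw [if_neg hnc]
            have ht : (c :: rest).takeWhile (· ≠ ')') = c :: rest.takeWhile (· ≠ ')') := by
              simp [hq]
            have hd : (c :: rest).dropWhile (· ≠ ')') = rest.dropWhile (· ≠ ')') := by
              simp [hq]
            rw [ht, hd]
            cases rest with
            | nil =>
              have h2 : ¬ (true = true ∧ ∃ c', ([] : List Char).head? = some c' ∧ c' ≠ ')') := by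
                simp
              rw [if_neg h2]
              simp [compileReSpecA, compileReRebuild, compileReGoB]
            | cons c' r' =>
              have hr' : (c' :: r').length ≤ n := hr
              by_cases hq' : c' = ')'
              · subst hq'
                have h2 : ¬ (true = true ∧
                    ∃ cc, ((')' : Char) :: r').head? = some cc ∧ cc ≠ ')') := by simp
                rw [if_neg h2, (ih _ hr').2]
                have ht2 : ((')' : Char) :: r').takeWhile (· ≠ ')') = [] := by
                  simp
                rw [ht2]
                simp [compileReRebuild]
              · have h2 : (true = true ∧ ∃ cc, (c' :: r').head? = some cc ∧ cc ≠ ')') :=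
                  ⟨rfl, c', rfl, hq'⟩
                rw [if_pos h2, (ih _ hr').2]
                have ht2 : (c' :: r').takeWhile (· ≠ ')') = c' :: r'.takeWhile (· ≠ ')') := by
                  simp [hq']
                rw [ht2]
                simp [compileReRebuild, hp]

lemma goB_no_paren : ∀ (cs : List Char), '(' ∉ cs → compileReGoB cs = cs := by
  intro cs
  induction cs with
  | nil => intro; simp [compileReGoB]
  | cons c rest ih =>
    intro h
    simp at h
    unfold compileReGoB
    rw [if_neg (fun hc => h.1 hc.symm), ih h.2]

-- ===== VERDICT (by name: the statement is the Claim_ definition above) =====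
theorem compile_re_spec : Claim_equal_compile_re := by
  intro pattern _
  unfold Spec_compile_re compile_re compile_re_alt
  by_cases h : pattern.toList.contains '('
  · rw [if_neg (by simpa using h)]
    rw [goA_eq_specA pattern.toList pattern.toList false 0 (by simp)]
    rw [(specA_eq_goB pattern.toList.length pattern.toList le_rfl).1]
  · rw [if_pos (by simpa using h)]
    rw [goB_no_paren pattern.toList (by simpa using h)]
    simp [String.ofList]
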